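-- pv_equiv track=rewrite | github.com/dleemiller/CnakeCharmer | data/grpo_problems/rectangle_fill_grid.py | rectangle_fill_grid
-- ===== SOURCE A (Python) =====
-- def rectangle_fill_grid(n):
--     """Fill an n x n grid by painting colored rectangles and summing pixel values.
--
--     Generates n deterministic rectangles with coordinates and RGB colors,
--     paints them onto the grid by accumulating color values, then computes
--     statistics over the result.
--
--     Args:
--         n: Grid dimension and number of rectangles to paint.
--
--     Returns:
--         (total_r, total_g, total_b, max_pixel_sum) across the grid.
--     """
--     grid_r = [[0] * n for _ in range(n)]
--     grid_g = [[0] * n for _ in range(n)]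
--     grid_b = [[0] * n for _ in range(n)]
--
--     for row in range(n):
--         x0 = (row * 3 + 1) % n
--         y0 = (row * 7 + 2) % n
--         x1 = min(x0 + (row % 5) + 1, n)
--         y1 = min(y0 + (row % 4) + 1, n)
--         r = (row * 17 + 5) % 256
--         g = (row * 31 + 11) % 256
--         b = (row * 53 + 23) % 256
--
--         for i in range(y0, y1):
--             for j in range(x0, x1):
--                 grid_r[i][j] += r
--                 grid_g[i][j] += g
--                 grid_b[i][j] += b
--
--     total_r = 0
--     total_g = 0
--     total_b = 0
--     max_pixel_sum = 0
--
--     for i in range(n):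
--         for j in range(n):
--             total_r += grid_r[i][j]
--             total_g += grid_g[i][j]
--             total_b += grid_b[i][j]
--             pixel_sum = grid_r[i][j] + grid_g[i][j] + grid_b[i][j]
--             if pixel_sum > max_pixel_sum:
--                 max_pixel_sum = pixel_sum
--
--     return (total_r, total_g, total_b, max_pixel_sum)
-- ===== SOURCE B (Python) =====
-- def rectangle_fill_grid(n):
--     """Fill an n x n grid by painting colored rectangles and summing pixel values.
--
--     O(n) re-implementation: totals are accumulated arithmetically as color * area
--     per rectangle; only painted cells (at most 20 per rectangle) are tracked in a
--     dict to find the maximum pixel sum. No n x n grids are allocated.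
--     """
--     total_r = 0
--     total_g = 0
--     total_b = 0
--     paint = {}
--     for row in range(n):
--         x0 = (row * 3 + 1) % n
--         y0 = (row * 7 + 2) % n
--         x1 = min(x0 + row % 5 + 1, n)
--         y1 = min(y0 + row % 4 + 1, n)
--         r = (row * 17 + 5) % 256
--         g = (row * 31 + 11) % 256
--         b = (row * 53 + 23) % 256
--         area = (x1 - x0) * (y1 - y0)
--         total_r += r * area
--         total_g += g * area
--         total_b += b * area
--         s = r + g + b
--         for i in range(y0, y1):
--             for j in range(x0, x1):
--                 paint[(i, j)] = paint.get((i, j), 0) + s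
--     max_pixel_sum = max(paint.values(), default=0)
--     return (total_r, total_g, total_b, max_pixel_sum)
-- ===== Notes on version B (the rewrite author's own statement) =====
-- stated objective: faster
-- what changed: B never allocates the n x n grids: color totals are accumulated arithmetically as color*area per rectangle, and only the O(1)-per-rectangle painted cells are tracked in a dict whose maximum value gives max_pixel_sum, replacing A's full-grid second pass.
import Mathlib
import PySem

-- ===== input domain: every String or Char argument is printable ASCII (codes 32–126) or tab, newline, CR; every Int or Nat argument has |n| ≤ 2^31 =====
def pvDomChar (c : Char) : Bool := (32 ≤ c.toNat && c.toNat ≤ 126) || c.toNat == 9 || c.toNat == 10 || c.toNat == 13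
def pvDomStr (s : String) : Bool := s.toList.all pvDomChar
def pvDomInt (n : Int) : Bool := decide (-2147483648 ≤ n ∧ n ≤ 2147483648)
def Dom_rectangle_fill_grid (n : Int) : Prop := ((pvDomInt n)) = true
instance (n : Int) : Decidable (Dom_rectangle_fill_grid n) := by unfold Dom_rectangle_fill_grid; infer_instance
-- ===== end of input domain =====

-- B avoids A's n×n grids entirely: color totals are accumulated as color*area per rectangle,
-- and only the painted cells are kept in a dict whose maximum value is the max pixel sum.

-- ===== PORT A =====

-- grid_x[i][j] reads/writes: both indices are nonnegative and in range wherever A executes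
-- them (loop bounds are clipped to [0, n)), so the defaulted forms below are exact there.
def pvCell (g : List (List Int)) (i j : Int) : Int :=
  PySem.List.pyGetD (PySem.List.pyGetD g i []) j 0
def pvBump (g : List (List Int)) (i j v : Int) : List (List Int) :=
  g.modify i.toNat (fun row => row.modify j.toNat (· + v))
def rectangle_fill_grid (n : Int) : List Int :=
  let g0 : List (List Int) := (PySem.List.pyRange 0 n 1).map (fun _ => List.replicate n.toNat (0 : Int))
  let st :=
    (PySem.List.pyRange 0 n 1).foldl (fun st row =>
      let x0 := PySem.Int.mod (row * 3 + 1) n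
      let y0 := PySem.Int.mod (row * 7 + 2) n
      let x1 := min (x0 + PySem.Int.mod row 5 + 1) n
      let y1 := min (y0 + PySem.Int.mod row 4 + 1) n
      let r := PySem.Int.mod (row * 17 + 5) 256
      let g := PySem.Int.mod (row * 31 + 11) 256
      let b := PySem.Int.mod (row * 53 + 23) 256
      (PySem.List.pyRange y0 y1 1).foldl (fun st i =>
        (PySem.List.pyRange x0 x1 1).foldl (fun st j =>
          (pvBump st.1 i j r, pvBump st.2.1 i j g, pvBump st.2.2 i j b)) st) st)
      (g0, g0, g0)
  let fin :=
    (PySem.List.pyRange 0 n 1).foldl (fun acc i =>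
      (PySem.List.pyRange 0 n 1).foldl (fun acc j =>
        let vr := pvCell st.1 i j
        let vg := pvCell st.2.1 i j
        let vb := pvCell st.2.2 i j
        (acc.1 + vr, acc.2.1 + vg, acc.2.2.1 + vb,
          if acc.2.2.2 < vr + vg + vb then vr + vg + vb else acc.2.2.2)) acc) ((0:Int), (0:Int), (0:Int), (0:Int))
  [fin.1, fin.2.1, fin.2.2.1, fin.2.2.2]

-- ===== PORT B =====

def rectangle_fill_grid_alt (n : Int) : List Int :=
  let st :=
    (PySem.List.pyRange 0 n 1).foldl
      (fun (st : Int × Int × Int × PySem.Dict (Int × Int) Int) row =>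
        let x0 := PySem.Int.mod (row * 3 + 1) n
        let y0 := PySem.Int.mod (row * 7 + 2) n
        let x1 := min (x0 + PySem.Int.mod row 5 + 1) n
        let y1 := min (y0 + PySem.Int.mod row 4 + 1) n
        let r := PySem.Int.mod (row * 17 + 5) 256
        let g := PySem.Int.mod (row * 31 + 11) 256
        let b := PySem.Int.mod (row * 53 + 23) 256
        let area := (x1 - x0) * (y1 - y0)
        let s := r + g + b
        let d :=
          (PySem.List.pyRange y0 y1 1).foldl (fun d i =>
            (PySem.List.pyRange x0 x1 1).foldl (fun d j =>
              d.insert (i, j) (d.getD (i, j) 0 + s)) d) st.2.2.2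
        (st.1 + r * area, st.2.1 + g * area, st.2.2.1 + b * area, d))
      (0, 0, 0, PySem.Dict.empty)
  let m := PySem.List.maxD st.2.2.2.values id 0
  [st.1, st.2.1, st.2.2.1, m]


-- ===== PRECONDITION & SPEC =====
def Spec_rectangle_fill_grid (n : Int) (out : List Int) : Prop := out = rectangle_fill_grid_alt n
instance (n : Int) (out : List Int) : Decidable (Spec_rectangle_fill_grid n out) := by unfold Spec_rectangle_fill_grid; infer_instance

-- ===== CLAIM (what is proved, stated in full; the proofs are below) =====
def Claim_equal_rectangle_fill_grid : Prop := ∀ (n : Int), Dom_rectangle_fill_grid n → Spec_rectangle_fill_grid n (rectangle_fill_grid n)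

-- ===== LEMMAS AND PROOFS =====

def pvShape (N : Nat) (g : List (List Int)) : Prop :=
  g.length = N ∧ ∀ (k : Nat) (h : k < g.length), g[k].length = N
def pvSum (g : List (List Int)) : Int := (g.map List.sum).sum

theorem pv_sum_modify (l : List Int) (j : Nat) (v : Int) (h : j < l.length) :
    (l.modify j (· + v)).sum = l.sum + v := by
  induction l generalizing j with
  | nil => simp at h
  | cons x xs ih =>
    cases j with
    | zero => simp [List.modify]; ring
    | succ k =>
      simp only [List.modify_succ_cons, List.sum_cons, ih k (by simpa using h)]
      ring

theorem pv_pvSum_bump (g : List (List Int)) (i j : Nat) (v : Int)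
    (hi : i < g.length) (hj : j < (g[i]).length) :
    pvSum (g.modify i (fun row => row.modify j (· + v))) = pvSum g + v := by
  induction g generalizing i with
  | nil => simp at hi
  | cons x xs ih =>
    cases i with
    | zero =>
      have hx : j < x.length := by simpa using hj
      have hmod : (x :: xs).modify 0 (fun row => row.modify j (· + v))
          = (x.modify j (· + v)) :: xs := rfl
      rw [hmod]
      simp only [pvSum, List.map_cons, List.sum_cons, pv_sum_modify x j v hx]
      ring
    | succ k =>
      have h1 : k < xs.length := by simpa using hi
      have h2 : j < (xs[k]).length := by simpa using hj
      have := ih k h1 h2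
      simp only [List.modify_succ_cons, pvSum, List.map_cons, List.sum_cons] at *
      omega

theorem pv_cell_eq (g : List (List Int)) (i j : Int) (h1 : 0 ≤ i) (h2 : i.toNat < g.length)
    (h3 : 0 ≤ j) (h4 : j.toNat < (g[i.toNat]).length) :
    pvCell g i j = g[i.toNat][j.toNat] := by
  unfold pvCell
  rw [PySem.List.pyGetD_eq_getElem g (i := i) [] h1 (by omega)]
  rw [PySem.List.pyGetD_eq_getElem g[i.toNat] (i := j) 0 h3 (by omega)]

theorem pv_shape_bump (g : List (List Int)) (N : Nat) (i j v : Int)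
    (hs : pvShape N g) : pvShape N (pvBump g i j v) := by
  constructor
  · simp [pvBump, hs.1]
  · intro k hk
    have hk' : k < g.length := by simpa [pvBump] using hk
    have := hs.2 k hk'
    simp only [pvBump, List.getElem_modify]
    split_ifs with h
    · subst h; simp [this]
    · exact this

theorem pv_cell_bump (g : List (List Int)) (N : Nat) (i j i' j' v : Int)
    (hs : pvShape N g)
    (hn : 0 ≤ i) (hi : i < (N : Int)) (hm : 0 ≤ j) (hj : j < (N : Int))
    (hn' : 0 ≤ i') (hi' : i' < (N : Int)) (hm' : 0 ≤ j') (hj' : j' < (N : Int)) :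
    pvCell (pvBump g i j v) i' j' = if i' = i ∧ j' = j then pvCell g i' j' + v else pvCell g i' j' := by
  have hlen : g.length = N := hs.1
  have h2 : i.toNat < g.length := by omega
  have h2' : i'.toNat < g.length := by omega
  have hrow : (g[i.toNat]).length = N := hs.2 _ h2
  have hrow' : (g[i'.toNat]).length = N := hs.2 _ h2'
  have hsb := pv_shape_bump g N i j v hs
  have h2b : i'.toNat < (pvBump g i j v).length := by
    simpa [pvBump] using h2'
  have hrowb : ((pvBump g i j v)[i'.toNat]).length = N := hsb.2 _ h2b
  rw [pv_cell_eq _ i' j' hn' h2b (by omega) (by omega)]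
  rw [pv_cell_eq g i' j' hn' h2' hm' (by omega)]
  simp only [pvBump, List.getElem_modify]
  by_cases hii : i' = i
  · by_cases hjj : j' = j
    · subst hii; subst hjj
      simp
    · have : i.toNat = i'.toNat := by omega
      simp only [this]
      have : ¬ (j.toNat = j'.toNat) := by omega
      simp [this, hii, hjj]
  · have : ¬ (i.toNat = i'.toNat) := by omega
    simp [this, hii]

def pvInRange (n : Int) (c : Int × Int) : Prop :=
  0 ≤ c.1 ∧ c.1 < n ∧ 0 ≤ c.2 ∧ c.2 < n

theorem pv_getD_nonneg (d : PySem.Dict (Int × Int) Int) (k : Int × Int)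
    (h : ∀ v ∈ d.values, 0 ≤ v) : 0 ≤ d.getD k 0 := by
  rw [PySem.Dict.getD_eq_get?_getD]
  cases h' : d.get? k with
  | none => simp
  | some v =>
    have hm := PySem.Dict.mem_items_of_get?_eq_some d h'
    refine h v ?_
    simp only [PySem.Dict.values]
    exact List.mem_map.mpr ⟨(k, v), hm, rfl⟩

theorem pv_paint_cells (n r g b : Int) (cells : List (Int × Int))
    (hc : ∀ c ∈ cells, pvInRange n c) (hn : 0 < n)
    (hr : 0 ≤ r) (hg : 0 ≤ g) (hb : 0 ≤ b) :
    ∀ (GR GG GB : List (List Int)) (d : PySem.Dict (Int × Int) Int),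
    pvShape n.toNat GR → pvShape n.toNat GG → pvShape n.toNat GB →
    d.keys.Nodup → (∀ k ∈ d.keys, pvInRange n k) → (∀ v ∈ d.values, 0 ≤ v) →
    (∀ c : Int × Int, pvInRange n c →
      d.getD c 0 = pvCell GR c.1 c.2 + pvCell GG c.1 c.2 + pvCell GB c.1 c.2) →
    (pvShape n.toNat (cells.foldl (fun h c => pvBump h c.1 c.2 r) GR) ∧
     pvShape n.toNat (cells.foldl (fun h c => pvBump h c.1 c.2 g) GG) ∧
     pvShape n.toNat (cells.foldl (fun h c => pvBump h c.1 c.2 b) GB) ∧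
     (cells.foldl (fun d c => d.insert (c.1, c.2) (d.getD (c.1, c.2) 0 + (r + g + b))) d).keys.Nodup ∧
     (∀ k ∈ (cells.foldl (fun d c => d.insert (c.1, c.2) (d.getD (c.1, c.2) 0 + (r + g + b))) d).keys, pvInRange n k) ∧
     (∀ v ∈ (cells.foldl (fun d c => d.insert (c.1, c.2) (d.getD (c.1, c.2) 0 + (r + g + b))) d).values, 0 ≤ v) ∧
     (∀ c : Int × Int, pvInRange n c →
       (cells.foldl (fun d c => d.insert (c.1, c.2) (d.getD (c.1, c.2) 0 + (r + g + b))) d).getD c 0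
         = pvCell (cells.foldl (fun h c => pvBump h c.1 c.2 r) GR) c.1 c.2
         + pvCell (cells.foldl (fun h c => pvBump h c.1 c.2 g) GG) c.1 c.2
         + pvCell (cells.foldl (fun h c => pvBump h c.1 c.2 b) GB) c.1 c.2)) := by
  induction cells with
  | nil => intro GR GG GB d h1 h2 h3 h4 h5 h6 h7; exact ⟨h1, h2, h3, h4, h5, h6, h7⟩
  | cons c cs ih =>
    intro GR GG GB d h1 h2 h3 h4 h5 h6 h7
    have hcr : pvInRange n c := hc c (by simp)
    obtain ⟨hc1, hc2, hc3, hc4⟩ := hcr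
    have hN : ((n.toNat : Int)) = n := by omega
    -- single step facts
    have hs1 := pv_shape_bump GR n.toNat c.1 c.2 r h1
    have hs2 := pv_shape_bump GG n.toNat c.1 c.2 g h2
    have hs3 := pv_shape_bump GB n.toNat c.1 c.2 b h3
    have hvnn : 0 ≤ d.getD (c.1, c.2) 0 + (r + g + b) := by
      have := pv_getD_nonneg d (c.1, c.2) h6
      omega
    have hkn : (d.insert (c.1, c.2) (d.getD (c.1, c.2) 0 + (r + g + b))).keys.Nodup :=
      PySem.Dict.nodup_keys_insert _ _ _ h4
    have hkr : ∀ k ∈ (d.insert (c.1, c.2) (d.getD (c.1, c.2) 0 + (r + g + b))).keys, pvInRange n k := by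
      intro k hk
      rcases (PySem.Dict.mem_keys_insert _ _ _ _).mp hk with h | h
      · subst h; exact ⟨hc1, hc2, hc3, hc4⟩
      · exact h5 k h
    have hvr : ∀ v ∈ (d.insert (c.1, c.2) (d.getD (c.1, c.2) 0 + (r + g + b))).values, 0 ≤ v := by
      intro v hv
      rcases PySem.Dict.mem_values_insert _ _ _ _ hv with h | h
      · omega
      · exact h6 v h
    have hinv : ∀ c' : Int × Int, pvInRange n c' →
        (d.insert (c.1, c.2) (d.getD (c.1, c.2) 0 + (r + g + b))).getD c' 0
          = pvCell (pvBump GR c.1 c.2 r) c'.1 c'.2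
          + pvCell (pvBump GG c.1 c.2 g) c'.1 c'.2
          + pvCell (pvBump GB c.1 c.2 b) c'.1 c'.2 := by
      intro c' hcr'
      obtain ⟨hd1, hd2, hd3, hd4⟩ := hcr'
      rw [PySem.Dict.getD_insert]
      rw [pv_cell_bump GR n.toNat c.1 c.2 c'.1 c'.2 r h1 hc1 (by omega) hc3 (by omega) hd1 (by omega) hd3 (by omega)]
      rw [pv_cell_bump GG n.toNat c.1 c.2 c'.1 c'.2 g h2 hc1 (by omega) hc3 (by omega) hd1 (by omega) hd3 (by omega)]
      rw [pv_cell_bump GB n.toNat c.1 c.2 c'.1 c'.2 b h3 hc1 (by omega) hc3 (by omega) hd1 (by omega) hd3 (by omega)]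
      by_cases he : c' = (c.1, c.2)
      · have he1 : c'.1 = c.1 := by rw [he]
        have he2 : c'.2 = c.2 := by rw [he]
        rw [if_pos he, if_pos ⟨he1, he2⟩, if_pos ⟨he1, he2⟩, if_pos ⟨he1, he2⟩]
        have h7' : d.getD (c.1, c.2) 0 = pvCell GR c.1 c.2 + pvCell GG c.1 c.2 + pvCell GB c.1 c.2 :=
          h7 (c.1, c.2) ⟨hc1, hc2, hc3, hc4⟩
        rw [he1, he2, h7']; ring
      · have hne : ¬ (c'.1 = c.1 ∧ c'.2 = c.2) := by
          intro ⟨u1, u2⟩; exact he (Prod.ext u1 u2)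
        rw [if_neg he, if_neg hne, if_neg hne, if_neg hne]
        exact h7 c' ⟨hd1, hd2, hd3, hd4⟩
    simpa using ih (fun c' hc' => hc c' (by simp [hc'])) _ _ _ _ hs1 hs2 hs3 hkn hkr hvr hinv

theorem pv_sum_paint (n v : Int) (cells : List (Int × Int))
    (hc : ∀ c ∈ cells, pvInRange n c) (hn : 0 < n) :
    ∀ (G : List (List Int)), pvShape n.toNat G →
      pvSum (cells.foldl (fun h c => pvBump h c.1 c.2 v) G) = pvSum G + v * cells.length := by
  induction cells with
  | nil => intro G hG; simp
  | cons c cs ih =>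
    intro G hG
    obtain ⟨hc1, hc2, hc3, hc4⟩ := hc c (by simp)
    have hi : (c.1).toNat < G.length := by have := hG.1; omega
    have hj : (c.2).toNat < (G[(c.1).toNat]).length := by
      have := hG.2 _ hi; omega
    have hstep : pvSum (pvBump G c.1 c.2 v) = pvSum G + v :=
      pv_pvSum_bump G (c.1).toNat (c.2).toNat v hi hj
    have := ih (fun c' hc' => hc c' (by simp [hc'])) (pvBump G c.1 c.2 v)
      (pv_shape_bump G n.toNat c.1 c.2 v hG)
    simp only [List.foldl_cons] at *
    rw [this, hstep]
    simp only [List.length_cons]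
    push_cast
    ring

theorem pv_foldl_nested {α β γ : Type} (l1 : List α) (l2 : List β)
    (h : γ → α → β → γ) (init : γ) :
    l1.foldl (fun acc i => l2.foldl (fun acc j => h acc i j) acc) init
      = (l1.flatMap (fun i => l2.map (fun j => (i, j)))).foldl (fun acc c => h acc c.1 c.2) init := by
  induction l1 generalizing init with
  | nil => rfl
  | cons x xs ih => simp [List.foldl_append, ih, List.foldl_map]

theorem pv_foldl_triple {α β1 β2 β3 : Type} (l : List α)
    (f1 : β1 → α → β1) (f2 : β2 → α → β2) (f3 : β3 → α → β3)
    (a : β1) (b : β2) (c : β3) :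
    l.foldl (fun s e => (f1 s.1 e, f2 s.2.1 e, f3 s.2.2 e)) (a, b, c)
      = (l.foldl f1 a, l.foldl f2 b, l.foldl f3 c) := by
  induction l generalizing a b c with
  | nil => rfl
  | cons x xs ih => simp [List.foldl_cons, ih]

def pvInv (n : Int) (A : List (List Int) × List (List Int) × List (List Int))
    (B : Int × Int × Int × PySem.Dict (Int × Int) Int) : Prop :=
  pvShape n.toNat A.1 ∧ pvShape n.toNat A.2.1 ∧ pvShape n.toNat A.2.2 ∧
  B.1 = pvSum A.1 ∧ B.2.1 = pvSum A.2.1 ∧ B.2.2.1 = pvSum A.2.2 ∧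
  B.2.2.2.keys.Nodup ∧
  (∀ k ∈ B.2.2.2.keys, pvInRange n k) ∧
  (∀ v ∈ B.2.2.2.values, 0 ≤ v) ∧
  (∀ c : Int × Int, pvInRange n c →
    B.2.2.2.getD c 0 = pvCell A.1 c.1 c.2 + pvCell A.2.1 c.1 c.2 + pvCell A.2.2 c.1 c.2)

theorem pv_rect_step (n x0 y0 x1 y1 r g b : Int)
    (hx0 : 0 ≤ x0) (hx01 : x0 ≤ x1) (hx1 : x1 ≤ n)
    (hy0 : 0 ≤ y0) (hy01 : y0 ≤ y1) (hy1 : y1 ≤ n)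
    (hr : 0 ≤ r) (hg : 0 ≤ g) (hb : 0 ≤ b) (hn : 0 < n)
    (A : List (List Int) × List (List Int) × List (List Int))
    (B : Int × Int × Int × PySem.Dict (Int × Int) Int)
    (hinv : pvInv n A B) :
    pvInv n
      ((PySem.List.pyRange y0 y1 1).foldl (fun st i =>
        (PySem.List.pyRange x0 x1 1).foldl (fun st j =>
          (pvBump st.1 i j r, pvBump st.2.1 i j g, pvBump st.2.2 i j b)) st) A)
      (B.1 + r * ((x1 - x0) * (y1 - y0)), B.2.1 + g * ((x1 - x0) * (y1 - y0)),
       B.2.2.1 + b * ((x1 - x0) * (y1 - y0)),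
       (PySem.List.pyRange y0 y1 1).foldl (fun d i =>
          (PySem.List.pyRange x0 x1 1).foldl (fun d j =>
            d.insert (i, j) (d.getD (i, j) 0 + (r + g + b))) d) B.2.2.2) := by
  obtain ⟨GR, GG, GB⟩ := A
  obtain ⟨tr, tg, tb, d⟩ := B
  obtain ⟨h1, h2, h3, h4, h5, h6, h7, h8, h9, h10⟩ := hinv
  set cells := (PySem.List.pyRange y0 y1 1).flatMap
      (fun i => (PySem.List.pyRange x0 x1 1).map (fun j => (i, j))) with hcells
  have hmem : ∀ c ∈ cells, pvInRange n c := by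
    intro c hcm
    rw [hcells] at hcm
    obtain ⟨i, hi, hcm2⟩ := List.mem_flatMap.mp hcm
    obtain ⟨j, hj, rfl⟩ := List.mem_map.mp hcm2
    have hi' := (PySem.List.mem_pyRange_one).mp hi
    have hj' := (PySem.List.mem_pyRange_one).mp hj
    exact ⟨by simp; omega, by simp; omega, by simp; omega, by simp; omega⟩
  have hlen : (cells.length : Int) = (x1 - x0) * (y1 - y0) := by
    rw [hcells, List.length_flatMap]
    have hmapeq : (PySem.List.pyRange y0 y1 1).map
          (fun a => ((PySem.List.pyRange x0 x1 1).map (fun j => ((a : Int), j))).length)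
        = (PySem.List.pyRange y0 y1 1).map (fun _ => (x1 - x0).toNat) := by
      apply List.map_congr_left
      intro i _
      simp [PySem.List.length_pyRange_one]
    rw [hmapeq, List.map_const', List.sum_replicate, smul_eq_mul, PySem.List.length_pyRange_one]
    have e1 : ((x1 - x0).toNat : Int) = x1 - x0 := by omega
    have e2 : ((y1 - y0).toNat : Int) = y1 - y0 := by omega
    push_cast
    rw [e1, e2]
    ring
  -- flatten A's nested fold and split it into three per-grid folds
  rw [pv_foldl_nested (PySem.List.pyRange y0 y1 1) (PySem.List.pyRange x0 x1 1)
    (fun st i j => (pvBump st.1 i j r, pvBump st.2.1 i j g, pvBump st.2.2 i j b)) (GR, GG, GB)]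
  rw [pv_foldl_triple cells (fun h c => pvBump h c.1 c.2 r) (fun h c => pvBump h c.1 c.2 g)
    (fun h c => pvBump h c.1 c.2 b) GR GG GB]
  -- flatten B's dict fold
  rw [pv_foldl_nested (PySem.List.pyRange y0 y1 1) (PySem.List.pyRange x0 x1 1)
    (fun d i j => d.insert (i, j) (d.getD (i, j) 0 + (r + g + b))) d]
  have hp := pv_paint_cells n r g b cells hmem hn hr hg hb GR GG GB d h1 h2 h3 h7 h8 h9 h10
  obtain ⟨p1, p2, p3, p4, p5, p6, p7⟩ := hp
  refine ⟨p1, p2, p3, ?_, ?_, ?_, p4, p5, p6, p7⟩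
  · have hsum : tr = pvSum GR := h4
    show tr + r * ((x1 - x0) * (y1 - y0)) = _
    rw [pv_sum_paint n r cells hmem hn GR h1, hlen, hsum]
  · have hsum : tg = pvSum GG := h5
    show tg + g * ((x1 - x0) * (y1 - y0)) = _
    rw [pv_sum_paint n g cells hmem hn GG h2, hlen, hsum]
  · have hsum : tb = pvSum GB := h6
    show tb + b * ((x1 - x0) * (y1 - y0)) = _
    rw [pv_sum_paint n b cells hmem hn GB h3, hlen, hsum]

theorem pv_foldl_max_le (l : List Int) (a b : Int) (h : a ≤ b) (h2 : ∀ y ∈ l, y ≤ b) :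
    l.foldl max a ≤ b := by
  induction l generalizing a with
  | nil => exact h
  | cons x xs ih =>
    refine ih _ (max_le h (h2 x (by simp))) ?_
    intro y hy
    exact h2 y (by simp [hy])

theorem pv_getD_cases (d : PySem.Dict (Int × Int) Int) (k : Int × Int) :
    d.getD k 0 = 0 ∨ d.getD k 0 ∈ d.values := by
  rw [PySem.Dict.getD_eq_get?_getD]
  cases h' : d.get? k with
  | none => left; rfl
  | some v =>
    right
    have hm := PySem.Dict.mem_items_of_get?_eq_some d h'
    simp only [PySem.Dict.values, Option.getD_some]
    exact List.mem_map.mpr ⟨(k, v), hm, rfl⟩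

def pvCellsAll (n : Int) : List (Int × Int) :=
  (PySem.List.pyRange 0 n 1).flatMap (fun i => (PySem.List.pyRange 0 n 1).map (fun j => (i, j)))

theorem pv_mem_cellsAll (n : Int) (c : Int × Int) : c ∈ pvCellsAll n ↔ pvInRange n c := by
  constructor
  · intro hc
    obtain ⟨i, hi, hc2⟩ := List.mem_flatMap.mp hc
    obtain ⟨j, hj, rfl⟩ := List.mem_map.mp hc2
    have hi' := (PySem.List.mem_pyRange_one).mp hi
    have hj' := (PySem.List.mem_pyRange_one).mp hj
    exact ⟨by simp; omega, by simp; omega, by simp; omega, by simp; omega⟩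
  · intro ⟨h1, h2, h3, h4⟩
    refine List.mem_flatMap.mpr ⟨c.1, (PySem.List.mem_pyRange_one).mpr ⟨h1, h2⟩, ?_⟩
    exact List.mem_map.mpr ⟨c.2, (PySem.List.mem_pyRange_one).mpr ⟨h3, h4⟩, rfl⟩

theorem pv_total (n : Int) (hn : 0 < n) (G : List (List Int)) (hs : pvShape n.toNat G) :
    (pvCellsAll n).foldl (fun t c => t + pvCell G c.1 c.2) 0 = pvSum G := by
  rw [PySem.List.foldl_add (pvCellsAll n) (fun c => pvCell G c.1 c.2) 0]
  rw [pvCellsAll, List.map_flatMap]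
  have hG : ((G.length : Int)) = n := by have := hs.1; omega
  have hrow : ∀ i ∈ PySem.List.pyRange 0 n 1,
      ((PySem.List.pyRange 0 n 1).map (fun j => ((i : Int), j))).map (fun c => pvCell G c.1 c.2)
        = PySem.List.pyGetD G i [] := by
    intro i hi
    have hi' := (PySem.List.mem_pyRange_one).mp hi
    rw [List.map_map]
    have : ((fun c : Int × Int => pvCell G c.1 c.2) ∘ (fun j => (i, j)))
        = fun j => PySem.List.pyGetD (PySem.List.pyGetD G i []) j 0 := by
      funext j; rfl
    rw [this]
    have hrl : ((PySem.List.pyGetD G i []).length : Int) = n := by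
      rw [PySem.List.pyGetD_eq_getElem G [] hi'.1 (by omega)]
      have := hs.2 i.toNat (by omega)
      omega
    rw [show PySem.List.pyRange 0 n 1 = PySem.List.pyRange 0 (PySem.List.len (PySem.List.pyGetD G i [])) 1 by
      rw [PySem.List.len_eq, hrl]]
    exact PySem.List.map_pyGetD_pyRange_zero (PySem.List.pyGetD G i []) 0
  rw [List.flatMap_congr hrow]
  rw [show PySem.List.pyRange 0 n 1 = PySem.List.pyRange 0 (PySem.List.len G) 1 by
    rw [PySem.List.len_eq, hG]]
  rw [show (List.flatMap (fun i => PySem.List.pyGetD G i []) (PySem.List.pyRange 0 (PySem.List.len G) 1))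
      = ((PySem.List.pyRange 0 (PySem.List.len G) 1).map (fun i => PySem.List.pyGetD G i [])).flatten from
    List.flatMap_def]
  rw [PySem.List.map_pyGetD_pyRange_zero G []]
  rw [List.sum_flatten]
  simp [pvSum]

theorem pv_init (n : Int) (hn : 0 < n) :
    pvInv n
      ((PySem.List.pyRange 0 n 1).map (fun _ => List.replicate n.toNat (0 : Int)),
       (PySem.List.pyRange 0 n 1).map (fun _ => List.replicate n.toNat (0 : Int)),
       (PySem.List.pyRange 0 n 1).map (fun _ => List.replicate n.toNat (0 : Int)))
      (0, 0, 0, PySem.Dict.empty) := by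
  have hshape : pvShape n.toNat ((PySem.List.pyRange 0 n 1).map (fun _ => List.replicate n.toNat (0 : Int))) := by
    constructor
    · simp [PySem.List.length_pyRange_one]
    · intro k hk
      simp
  have hcell : ∀ c : Int × Int, pvInRange n c →
      pvCell ((PySem.List.pyRange 0 n 1).map (fun _ => List.replicate n.toNat (0 : Int))) c.1 c.2 = 0 := by
    intro c ⟨h1, h2, h3, h4⟩
    rw [pv_cell_eq _ c.1 c.2 h1 (by simp [PySem.List.length_pyRange_one]; omega) h3 (by simp [PySem.List.length_pyRange_one]; omega)]
    simp
  refine ⟨hshape, hshape, hshape, by simp [pvSum], by simp [pvSum], by simp [pvSum], ?_, ?_, ?_, ?_⟩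
  · simp [PySem.Dict.keys_empty]
  · intro k hk
    simp [PySem.Dict.keys_empty] at hk
  · intro v hv
    simp [PySem.Dict.values, PySem.Dict.empty] at hv
  · intro c hc
    rw [PySem.Dict.getD_empty, hcell c hc]
    simp

theorem pv_max (n : Int) (d : PySem.Dict (Int × Int) Int)
    (hnd : d.keys.Nodup) (hkr : ∀ k ∈ d.keys, pvInRange n k) (hvn : ∀ v ∈ d.values, 0 ≤ v) :
    ((pvCellsAll n).map (fun c => d.getD c 0)).foldl max 0 = PySem.List.maxD d.values id 0 := by
  have hmaxD : PySem.List.maxD d.values id 0 = (PySem.List.max? d.values id).getD 0 := by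
    simp [PySem.List.maxD]
  rw [hmaxD]
  cases hv : PySem.List.max? d.values id with
  | none =>
    have hnil : d.values = [] := (PySem.List.max?_eq_none_iff d.values id).mp hv
    simp only [Option.getD_none]
    apply le_antisymm
    · apply pv_foldl_max_le _ _ _ le_rfl
      intro y hy
      obtain ⟨c, _, rfl⟩ := List.mem_map.mp hy
      rcases pv_getD_cases d c with h | h
      · omega
      · rw [hnil] at h; simp at h
    · exact (PySem.List.le_foldl_max _ _).1
  | some m =>
    have hmm : m ∈ d.values := PySem.List.max?_mem hv
    have hub : ∀ y ∈ d.values, y ≤ m := by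
      intro y hy
      simpa using PySem.List.max?_isMax hv y hy
    have hm0 : 0 ≤ m := hvn m hmm
    simp only [Option.getD_some]
    apply le_antisymm
    · apply pv_foldl_max_le _ _ _ hm0
      intro y hy
      obtain ⟨c, _, rfl⟩ := List.mem_map.mp hy
      rcases pv_getD_cases d c with h | h
      · omega
      · exact hub _ h
    · have hvals : d.values = d.keys.map (fun k => d.getD k 0) :=
        PySem.Dict.values_eq_map_keys d hnd 0
      rw [hvals] at hmm
      obtain ⟨k, hk, rfl⟩ := List.mem_map.mp hmm
      have hkin : k ∈ pvCellsAll n := (pv_mem_cellsAll n k).mpr (hkr k hk)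
      exact (PySem.List.le_foldl_max _ _).2 _ (List.mem_map.mpr ⟨k, hkin, rfl⟩)

theorem pv_rows (n : Int) (hn : 0 < n) (rows : List Int) :
    ∀ (A : List (List Int) × List (List Int) × List (List Int))
      (B : Int × Int × Int × PySem.Dict (Int × Int) Int), pvInv n A B →
    pvInv n
      (rows.foldl (fun st row =>
        let x0 := PySem.Int.mod (row * 3 + 1) n
        let y0 := PySem.Int.mod (row * 7 + 2) n
        let x1 := min (x0 + PySem.Int.mod row 5 + 1) n
        let y1 := min (y0 + PySem.Int.mod row 4 + 1) n
        let r := PySem.Int.mod (row * 17 + 5) 256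
        let g := PySem.Int.mod (row * 31 + 11) 256
        let b := PySem.Int.mod (row * 53 + 23) 256
        (PySem.List.pyRange y0 y1 1).foldl (fun st i =>
          (PySem.List.pyRange x0 x1 1).foldl (fun st j =>
            (pvBump st.1 i j r, pvBump st.2.1 i j g, pvBump st.2.2 i j b)) st) st) A)
      (rows.foldl (fun st row =>
        let x0 := PySem.Int.mod (row * 3 + 1) n
        let y0 := PySem.Int.mod (row * 7 + 2) n
        let x1 := min (x0 + PySem.Int.mod row 5 + 1) n
        let y1 := min (y0 + PySem.Int.mod row 4 + 1) n
        let r := PySem.Int.mod (row * 17 + 5) 256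
        let g := PySem.Int.mod (row * 31 + 11) 256
        let b := PySem.Int.mod (row * 53 + 23) 256
        let area := (x1 - x0) * (y1 - y0)
        let s := r + g + b
        let d :=
          (PySem.List.pyRange y0 y1 1).foldl (fun d i =>
            (PySem.List.pyRange x0 x1 1).foldl (fun d j =>
              d.insert (i, j) (d.getD (i, j) 0 + s)) d) st.2.2.2
        (st.1 + r * area, st.2.1 + g * area, st.2.2.1 + b * area, d)) B) := by
  induction rows with
  | nil => intro A B h; exact h
  | cons x xs ih =>
    intro A B h
    simp only [List.foldl_cons]
    apply ih
    have hx0 := PySem.Int.mod_nonneg (x * 3 + 1) hn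
    have hx0' := PySem.Int.mod_lt (x * 3 + 1) hn
    have hy0 := PySem.Int.mod_nonneg (x * 7 + 2) hn
    have hy0' := PySem.Int.mod_lt (x * 7 + 2) hn
    have h5 := PySem.Int.mod_nonneg x (by norm_num : (0:Int) < 5)
    have h4 := PySem.Int.mod_nonneg x (by norm_num : (0:Int) < 4)
    have hr := PySem.Int.mod_nonneg (x * 17 + 5) (by norm_num : (0:Int) < 256)
    have hg := PySem.Int.mod_nonneg (x * 31 + 11) (by norm_num : (0:Int) < 256)
    have hb := PySem.Int.mod_nonneg (x * 53 + 23) (by norm_num : (0:Int) < 256)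
    exact pv_rect_step n
      (PySem.Int.mod (x * 3 + 1) n) (PySem.Int.mod (x * 7 + 2) n)
      (min (PySem.Int.mod (x * 3 + 1) n + PySem.Int.mod x 5 + 1) n)
      (min (PySem.Int.mod (x * 7 + 2) n + PySem.Int.mod x 4 + 1) n)
      (PySem.Int.mod (x * 17 + 5) 256) (PySem.Int.mod (x * 31 + 11) 256) (PySem.Int.mod (x * 53 + 23) 256)
      hx0 (le_min (by omega) (by omega)) (min_le_right _ _)
      hy0 (le_min (by omega) (by omega)) (min_le_right _ _)
      hr hg hb hn A B h

theorem pv_foldl_quad {α β1 β2 β3 β4 : Type} (l : List α)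
    (f1 : β1 → α → β1) (f2 : β2 → α → β2) (f3 : β3 → α → β3) (f4 : β4 → α → β4)
    (a : β1) (b : β2) (c : β3) (d : β4) :
    l.foldl (fun s e => (f1 s.1 e, f2 s.2.1 e, f3 s.2.2.1 e, f4 s.2.2.2 e)) (a, b, c, d)
      = (l.foldl f1 a, l.foldl f2 b, l.foldl f3 c, l.foldl f4 d) := by
  induction l generalizing a b c d with
  | nil => rfl
  | cons x xs ih => simp only [List.foldl_cons, ih]

theorem pv_pass2 (n : Int) (hn : 0 < n)
    (GR GG GB : List (List Int)) (tr tg tb : Int) (d : PySem.Dict (Int × Int) Int)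
    (hinv : pvInv n (GR, GG, GB) (tr, tg, tb, d)) :
    ((PySem.List.pyRange 0 n 1).foldl (fun acc i =>
      (PySem.List.pyRange 0 n 1).foldl (fun acc j =>
        (acc.1 + pvCell GR i j, acc.2.1 + pvCell GG i j, acc.2.2.1 + pvCell GB i j,
          if acc.2.2.2 < pvCell GR i j + pvCell GG i j + pvCell GB i j
          then pvCell GR i j + pvCell GG i j + pvCell GB i j
          else acc.2.2.2)) acc) ((0:Int), (0:Int), (0:Int), (0:Int)))
      = (tr, tg, tb, PySem.List.maxD d.values id 0) := by
  obtain ⟨h1, h2, h3, h4, h5, h6, h7, h8, h9, h10⟩ := hinv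
  rw [pv_foldl_nested (PySem.List.pyRange 0 n 1) (PySem.List.pyRange 0 n 1)
    (fun acc i j => ((acc.1 + pvCell GR i j, acc.2.1 + pvCell GG i j, acc.2.2.1 + pvCell GB i j,
          if acc.2.2.2 < pvCell GR i j + pvCell GG i j + pvCell GB i j
          then pvCell GR i j + pvCell GG i j + pvCell GB i j
          else acc.2.2.2) : Int × Int × Int × Int)) (0, 0, 0, 0)]
  rw [show ((PySem.List.pyRange 0 n 1).flatMap (fun i => (PySem.List.pyRange 0 n 1).map (fun j => (i, j)))) = pvCellsAll n from rfl]
  rw [pv_foldl_quad (pvCellsAll n)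
    (fun t c => t + pvCell GR c.1 c.2) (fun t c => t + pvCell GG c.1 c.2)
    (fun t c => t + pvCell GB c.1 c.2)
    (fun m c => if m < pvCell GR c.1 c.2 + pvCell GG c.1 c.2 + pvCell GB c.1 c.2
      then pvCell GR c.1 c.2 + pvCell GG c.1 c.2 + pvCell GB c.1 c.2 else m)
    0 0 0 0]
  have e1 : (pvCellsAll n).foldl (fun t c => t + pvCell GR c.1 c.2) 0 = tr := by
    rw [pv_total n hn GR h1]; exact h4.symm
  have e2 : (pvCellsAll n).foldl (fun t c => t + pvCell GG c.1 c.2) 0 = tg := by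
    rw [pv_total n hn GG h2]; exact h5.symm
  have e3 : (pvCellsAll n).foldl (fun t c => t + pvCell GB c.1 c.2) 0 = tb := by
    rw [pv_total n hn GB h3]; exact h6.symm
  have e4 : (pvCellsAll n).foldl
      (fun m c => if m < pvCell GR c.1 c.2 + pvCell GG c.1 c.2 + pvCell GB c.1 c.2
        then pvCell GR c.1 c.2 + pvCell GG c.1 c.2 + pvCell GB c.1 c.2 else m) 0
      = PySem.List.maxD d.values id 0 := by
    have hift : ∀ (m s : Int), (if m < s then s else m) = max m s := by
      intro m s
      rcases lt_or_ge m s with h | h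
      · simp [h, max_eq_right h.le]
      · simp [not_lt.mpr h, max_eq_left h]
    simp only [hift]
    have hcong : (pvCellsAll n).foldl
          (fun m c => max m (pvCell GR c.1 c.2 + pvCell GG c.1 c.2 + pvCell GB c.1 c.2)) 0
        = (pvCellsAll n).foldl (fun m c => max m (d.getD c 0)) 0 := by
      apply PySem.List.foldl_congr_mem
      intro acc c hc
      rw [h10 c ((pv_mem_cellsAll n c).mp hc)]
    rw [hcong]
    rw [show (fun (m : Int) (c : Int × Int) => max m (d.getD c 0))
        = fun m c => max m ((fun c : Int × Int => d.getD c 0) c) from rfl]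
    rw [← List.foldl_map]
    exact pv_max n d h7 h8 h9
  rw [e1, e2, e3, e4]
theorem pv_main (n : Int) : rectangle_fill_grid n = rectangle_fill_grid_alt n := by
  by_cases hn : 0 < n
  · unfold rectangle_fill_grid rectangle_fill_grid_alt
    have hinv := pv_rows n hn (PySem.List.pyRange 0 n 1)
      ((PySem.List.pyRange 0 n 1).map (fun _ => List.replicate n.toNat (0 : Int)),
       (PySem.List.pyRange 0 n 1).map (fun _ => List.replicate n.toNat (0 : Int)),
       (PySem.List.pyRange 0 n 1).map (fun _ => List.replicate n.toNat (0 : Int)))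
      (0, 0, 0, PySem.Dict.empty) (pv_init n hn)
    set stA := (PySem.List.pyRange 0 n 1).foldl (fun st row =>
      let x0 := PySem.Int.mod (row * 3 + 1) n
      let y0 := PySem.Int.mod (row * 7 + 2) n
      let x1 := min (x0 + PySem.Int.mod row 5 + 1) n
      let y1 := min (y0 + PySem.Int.mod row 4 + 1) n
      let r := PySem.Int.mod (row * 17 + 5) 256
      let g := PySem.Int.mod (row * 31 + 11) 256
      let b := PySem.Int.mod (row * 53 + 23) 256
      (PySem.List.pyRange y0 y1 1).foldl (fun st i =>
        (PySem.List.pyRange x0 x1 1).foldl (fun st j =>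
          (pvBump st.1 i j r, pvBump st.2.1 i j g, pvBump st.2.2 i j b)) st) st)
      ((PySem.List.pyRange 0 n 1).map (fun _ => List.replicate n.toNat (0 : Int)),
       (PySem.List.pyRange 0 n 1).map (fun _ => List.replicate n.toNat (0 : Int)),
       (PySem.List.pyRange 0 n 1).map (fun _ => List.replicate n.toNat (0 : Int))) with hstA
    set stB := (PySem.List.pyRange 0 n 1).foldl
      (fun (st : Int × Int × Int × PySem.Dict (Int × Int) Int) row =>
        let x0 := PySem.Int.mod (row * 3 + 1) n
        let y0 := PySem.Int.mod (row * 7 + 2) n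
        let x1 := min (x0 + PySem.Int.mod row 5 + 1) n
        let y1 := min (y0 + PySem.Int.mod row 4 + 1) n
        let r := PySem.Int.mod (row * 17 + 5) 256
        let g := PySem.Int.mod (row * 31 + 11) 256
        let b := PySem.Int.mod (row * 53 + 23) 256
        let area := (x1 - x0) * (y1 - y0)
        let s := r + g + b
        let d :=
          (PySem.List.pyRange y0 y1 1).foldl (fun d i =>
            (PySem.List.pyRange x0 x1 1).foldl (fun d j =>
              d.insert (i, j) (d.getD (i, j) 0 + s)) d) st.2.2.2
        (st.1 + r * area, st.2.1 + g * area, st.2.2.1 + b * area, d))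
      (0, 0, 0, PySem.Dict.empty) with hstB
    have hinv' : pvInv n (stA.1, stA.2.1, stA.2.2) (stB.1, stB.2.1, stB.2.2.1, stB.2.2.2) := hinv
    have hfin := pv_pass2 n hn stA.1 stA.2.1 stA.2.2 stB.1 stB.2.1 stB.2.2.1 stB.2.2.2 hinv'
    show [((PySem.List.pyRange 0 n 1).foldl (fun acc i =>
      (PySem.List.pyRange 0 n 1).foldl (fun acc j =>
        (acc.1 + pvCell stA.1 i j, acc.2.1 + pvCell stA.2.1 i j, acc.2.2.1 + pvCell stA.2.2 i j,
          if acc.2.2.2 < pvCell stA.1 i j + pvCell stA.2.1 i j + pvCell stA.2.2 i j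
          then pvCell stA.1 i j + pvCell stA.2.1 i j + pvCell stA.2.2 i j
          else acc.2.2.2)) acc) ((0:Int), (0:Int), (0:Int), (0:Int))).1, _, _, _] = _
    rw [hfin]
  · have hempty : PySem.List.pyRange 0 n 1 = [] := PySem.List.pyRange_one_eq_nil (by omega)
    unfold rectangle_fill_grid rectangle_fill_grid_alt
    rw [hempty]
    rfl

-- ===== VERDICT (by name: the statement is the Claim_ definition above) =====
theorem rectangle_fill_grid_spec : Claim_equal_rectangle_fill_grid := by
  intro n _
  exact pv_main n
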